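-- pv_equiv track=rewrite | github.com/IorenzoLF/Le_Refuge | Le_refuge/arc_agi_refuge/puzzle_15_simple.py | appliquer_pattern_inversion
-- ===== SOURCE A (Python) =====
-- def appliquer_pattern_inversion(input_grid):
--     """Appliquer le pattern d'inversion couleur"""
--     output_grid = [[0 for _ in range(9)] for _ in range(9)]
--
--     # Positions colorées de l'input
--     positions_colorees = []
--     for i in range(3):
--         for j in range(3):
--             if input_grid[i][j] != 0:
--                 positions_colorees.append((i, j, input_grid[i][j]))
--
--     # Reproduction x3 avec pattern diagonal
--     for x, y, couleur in positions_colorees: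
--         for dx in range(3):
--             for dy in range(3):
--                 new_x = x * 3 + dx
--                 new_y = y * 3 + dy
--
--                 if new_x < 9 and new_y < 9:
--                     # Pattern diagonal confirmé
--                     if (x, y) in [(0, 2), (1, 1), (2, 0)]:
--                         output_grid[new_x][new_y] = couleur
--
--     return output_grid
-- ===== SOURCE B (Python) =====
-- def appliquer_pattern_inversion(input_grid):
--     """Appliquer le pattern d'inversion couleur"""
--     return [
--         [input_grid[X // 3][Y // 3] if (X // 3, Y // 3) in ((0, 2), (1, 1), (2, 0)) else 0
--          for Y in range(9)]
--         for X in range(9)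
--     ]
-- ===== Notes on version B (the rewrite author's own statement) =====
-- stated objective: simpler
-- what changed: B gathers: it builds each output cell directly by looking up input[X//3][Y//3] when that block lies on the anti-diagonal, instead of A's scatter (collect nonzero positions, then expand each into a 3x3 block under a membership filter); no positions list is maintained.
import Mathlib
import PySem

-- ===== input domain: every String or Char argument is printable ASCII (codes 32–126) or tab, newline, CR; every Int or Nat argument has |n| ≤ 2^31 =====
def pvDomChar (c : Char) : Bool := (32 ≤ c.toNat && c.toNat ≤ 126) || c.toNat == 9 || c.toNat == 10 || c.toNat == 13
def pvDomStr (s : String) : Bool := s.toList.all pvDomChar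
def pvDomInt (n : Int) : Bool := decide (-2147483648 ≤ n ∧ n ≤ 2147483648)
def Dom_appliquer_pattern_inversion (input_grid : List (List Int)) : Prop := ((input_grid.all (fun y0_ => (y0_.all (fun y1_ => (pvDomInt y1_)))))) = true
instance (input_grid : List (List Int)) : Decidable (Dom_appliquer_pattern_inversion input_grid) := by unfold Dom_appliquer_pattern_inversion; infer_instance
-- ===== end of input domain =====

-- B builds each output cell by a direct gather lookup input[X//3][Y//3] on the anti-diagonal,
-- replacing A's scatter (collect nonzero positions, expand each into a 3x3 block): simpler, same cost.


-- ===== PORT A =====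
-- input_grid[i][j], total via getD; exact on Pre_ (indices 0..2 in range there)
def pvCell (g : List (List Int)) (i j : Int) : Int :=
  ((PySem.List.pyGet? g i).getD []) |> (fun r => (PySem.List.pyGet? r j).getD 0)

-- output_grid[x][y] = v (x, y are the nonnegative literals A constructs; in range 0..8)
def pvSet2d (g : List (List Int)) (x y : Nat) (v : Int) : List (List Int) :=
  g.set x ((g.getD x []).set y v)

-- the body of A's outer scatter loop: expand one colored position into its 3x3 block
def pvScatterStep (g : List (List Int)) (p : Nat × Nat × Int) : List (List Int) :=
  let (x, y, couleur) := p
  (List.range 3).foldl (fun g dx =>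
    (List.range 3).foldl (fun g dy =>
      let new_x := x * 3 + dx
      let new_y := y * 3 + dy
      if new_x < 9 ∧ new_y < 9 then
        if (x, y) = (0, 2) ∨ (x, y) = (1, 1) ∨ (x, y) = (2, 0) then
          pvSet2d g new_x new_y couleur
        else g
      else g) g) g

def appliquer_pattern_inversion (input_grid : List (List Int)) : List (List Int) :=
  -- output_grid = [[0]*9]*9
  let output_grid : List (List Int) := List.replicate 9 (List.replicate 9 (0 : Int))
  -- collect colored positions of the 3x3 input
  let positions : List (Nat × Nat × Int) :=
    (List.range 3).foldl (fun acc i =>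
      (List.range 3).foldl (fun acc j =>
        let v := pvCell input_grid (Int.ofNat i) (Int.ofNat j)
        if v ≠ 0 then acc ++ [(i, j, v)] else acc) acc) []
  -- scatter each position into its 3x3 block under the diagonal filter
  positions.foldl pvScatterStep output_grid

-- ===== PORT B =====
def appliquer_pattern_inversion_alt (input_grid : List (List Int)) : List (List Int) :=
  (List.range 9).map (fun X =>
    (List.range 9).map (fun Y =>
      let bx : Nat := X / 3
      let by_ : Nat := Y / 3
      if (bx, by_) = (0, 2) ∨ (bx, by_) = (1, 1) ∨ (bx, by_) = (2, 0) then
        pvCell input_grid (Int.ofNat bx) (Int.ofNat by_)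
      else 0))

-- ===== PRECONDITION & SPEC =====
-- A raises IndexError unless the grid has ≥ 3 rows whose first three rows each have ≥ 3 entries.
def Pre_appliquer_pattern_inversion (input_grid : List (List Int)) : Prop :=
  3 ≤ input_grid.length ∧ ∀ r ∈ input_grid.take 3, 3 ≤ r.length
instance (input_grid : List (List Int)) : Decidable (Pre_appliquer_pattern_inversion input_grid) := by unfold Pre_appliquer_pattern_inversion; infer_instance

def pvWitness_appliquer_pattern_inversion : List (List Int) :=
  [[1, 0, 2], [0, 3, 0], [4, 0, 0]]

def Spec_appliquer_pattern_inversion (input_grid : List (List Int)) (out : List (List Int)) : Prop := out = appliquer_pattern_inversion_alt input_grid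
instance (input_grid : List (List Int)) (out : List (List Int)) : Decidable (Spec_appliquer_pattern_inversion input_grid out) := by unfold Spec_appliquer_pattern_inversion; infer_instance

-- ===== CLAIM (what is proved, stated in full; the proofs are below) =====
def Claim_equal_appliquer_pattern_inversion : Prop := ∀ (input_grid : List (List Int)), Dom_appliquer_pattern_inversion input_grid → Pre_appliquer_pattern_inversion input_grid → Spec_appliquer_pattern_inversion input_grid (appliquer_pattern_inversion input_grid)

-- ===== LEMMAS AND PROOFS =====
lemma pvThree {α : Type} (l : List α) (h : 3 ≤ l.length) : ∃ a b c t, l = a :: b :: c :: t := by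
  match l with
  | a :: b :: c :: t => exact ⟨a, b, c, t, rfl⟩
  | [] | [_] | [_, _] => simp at h

-- the anti-diagonal test A's inner loop performs, as a Boolean on a position
def pvDiag (p : Nat × Nat × Int) : Bool :=
  decide ((p.1, p.2.1) = (0, 2) ∨ (p.1, p.2.1) = (1, 1) ∨ (p.1, p.2.1) = (2, 0))

lemma pvScatterStep_nondiag (g : List (List Int)) (x y : Nat) (v : Int)
    (h : ¬(x = 0 ∧ y = 2 ∨ x = 1 ∧ y = 1 ∨ x = 2 ∧ y = 0)) :
    pvScatterStep g (x, y, v) = g := by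
  simp [pvScatterStep, show List.range 3 = [0, 1, 2] from rfl, List.foldl, Prod.mk.injEq, h]

lemma foldl_scatter_filter (l : List (Nat × Nat × Int)) (g : List (List Int)) :
    l.foldl pvScatterStep g = (l.filter pvDiag).foldl pvScatterStep g := by
  induction l generalizing g with
  | nil => rfl
  | cons p t ih =>
    obtain ⟨x, y, v⟩ := p
    by_cases h : pvDiag (x, y, v) = true
    · simp only [List.filter_cons, h, if_pos, List.foldl_cons, ih]
    · have h' : ¬(x = 0 ∧ y = 2 ∨ x = 1 ∧ y = 1 ∨ x = 2 ∧ y = 0) := by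
        simpa [pvDiag, Prod.mk.injEq] using h
      simp only [List.filter_cons, h, List.foldl_cons, ih,
        pvScatterStep_nondiag g x y v h', Bool.false_eq_true, if_neg, not_false_iff]

-- ===== VERDICT (by name: the statement is the Claim_ definition above) =====
set_option maxHeartbeats 4000000 in
theorem appliquer_pattern_inversion_spec : Claim_equal_appliquer_pattern_inversion := by
  intro g _ hPre
  unfold Spec_appliquer_pattern_inversion
  obtain ⟨hlen, hrows⟩ := hPre
  obtain ⟨r0, r1, r2, rest, rfl⟩ := pvThree g hlen
  obtain ⟨a0, a1, a2, t0, rfl⟩ := pvThree r0 (hrows _ (by simp))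
  obtain ⟨b0, b1, b2, t1, rfl⟩ := pvThree r1 (hrows _ (by simp))
  obtain ⟨c0, c1, c2, t2, rfl⟩ := pvThree r2 (hrows _ (by simp))
  have e00 : pvCell ((a0 :: a1 :: a2 :: t0) :: (b0 :: b1 :: b2 :: t1) :: (c0 :: c1 :: c2 :: t2) :: rest) (0 : Int) (0 : Int) = a0 := by simp [pvCell, pysem]
  have e01 : pvCell ((a0 :: a1 :: a2 :: t0) :: (b0 :: b1 :: b2 :: t1) :: (c0 :: c1 :: c2 :: t2) :: rest) (0 : Int) (1 : Int) = a1 := by simp [pvCell, pysem]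
  have e02 : pvCell ((a0 :: a1 :: a2 :: t0) :: (b0 :: b1 :: b2 :: t1) :: (c0 :: c1 :: c2 :: t2) :: rest) (0 : Int) (2 : Int) = a2 := by simp [pvCell, pysem]
  have e10 : pvCell ((a0 :: a1 :: a2 :: t0) :: (b0 :: b1 :: b2 :: t1) :: (c0 :: c1 :: c2 :: t2) :: rest) (1 : Int) (0 : Int) = b0 := by simp [pvCell, pysem]
  have e11 : pvCell ((a0 :: a1 :: a2 :: t0) :: (b0 :: b1 :: b2 :: t1) :: (c0 :: c1 :: c2 :: t2) :: rest) (1 : Int) (1 : Int) = b1 := by simp [pvCell, pysem]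
  have e12 : pvCell ((a0 :: a1 :: a2 :: t0) :: (b0 :: b1 :: b2 :: t1) :: (c0 :: c1 :: c2 :: t2) :: rest) (1 : Int) (2 : Int) = b2 := by simp [pvCell, pysem]
  have e20 : pvCell ((a0 :: a1 :: a2 :: t0) :: (b0 :: b1 :: b2 :: t1) :: (c0 :: c1 :: c2 :: t2) :: rest) (2 : Int) (0 : Int) = c0 := by simp [pvCell, pysem]
  have e21 : pvCell ((a0 :: a1 :: a2 :: t0) :: (b0 :: b1 :: b2 :: t1) :: (c0 :: c1 :: c2 :: t2) :: rest) (2 : Int) (1 : Int) = c1 := by simp [pvCell, pysem]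
  have e22 : pvCell ((a0 :: a1 :: a2 :: t0) :: (b0 :: b1 :: b2 :: t1) :: (c0 :: c1 :: c2 :: t2) :: rest) (2 : Int) (2 : Int) = c2 := by simp [pvCell, pysem]
  have hB : appliquer_pattern_inversion_alt
      ((a0 :: a1 :: a2 :: t0) :: (b0 :: b1 :: b2 :: t1) :: (c0 :: c1 :: c2 :: t2) :: rest) =
      [[0, 0, 0, 0, 0, 0, a2, a2, a2],
       [0, 0, 0, 0, 0, 0, a2, a2, a2],
       [0, 0, 0, 0, 0, 0, a2, a2, a2],
       [0, 0, 0, b1, b1, b1, 0, 0, 0],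
       [0, 0, 0, b1, b1, b1, 0, 0, 0],
       [0, 0, 0, b1, b1, b1, 0, 0, 0],
       [c0, c0, c0, 0, 0, 0, 0, 0, 0],
       [c0, c0, c0, 0, 0, 0, 0, 0, 0],
       [c0, c0, c0, 0, 0, 0, 0, 0, 0]] := by
    simp [appliquer_pattern_inversion_alt,
      show List.range 9 = [0, 1, 2, 3, 4, 5, 6, 7, 8] from rfl, e02, e11, e20]
  have hpos : List.filter pvDiag
      ((List.range 3).foldl (fun acc i =>
        (List.range 3).foldl (fun acc j =>
          let v := pvCell ((a0 :: a1 :: a2 :: t0) :: (b0 :: b1 :: b2 :: t1) :: (c0 :: c1 :: c2 :: t2) :: rest)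
            (Int.ofNat i) (Int.ofNat j)
          if v ≠ 0 then acc ++ [(i, j, v)] else acc) acc) []) =
      (if a2 ≠ 0 then [((0 : Nat), (2 : Nat), a2)] else []) ++
      (if b1 ≠ 0 then [((1 : Nat), (1 : Nat), b1)] else []) ++
      (if c0 ≠ 0 then [((2 : Nat), (0 : Nat), c0)] else []) := by
    simp only [show List.range 3 = [0, 1, 2] from rfl, List.foldl]
    simp only [Int.ofNat_eq_natCast, Nat.cast_ofNat, Nat.cast_zero, Nat.cast_one]
    simp only [e00, e01, e02, e10, e11, e12, e20, e21, e22]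
    simp only [apply_ite (List.filter pvDiag), List.filter_append, List.filter_cons,
      List.filter_nil,
      show ∀ v : Int, pvDiag (0, 0, v) = false from fun _ => rfl,
      show ∀ v : Int, pvDiag (0, 1, v) = false from fun _ => rfl,
      show ∀ v : Int, pvDiag (0, 2, v) = true from fun _ => rfl,
      show ∀ v : Int, pvDiag (1, 0, v) = false from fun _ => rfl,
      show ∀ v : Int, pvDiag (1, 1, v) = true from fun _ => rfl,
      show ∀ v : Int, pvDiag (1, 2, v) = false from fun _ => rfl,
      show ∀ v : Int, pvDiag (2, 0, v) = true from fun _ => rfl,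
      show ∀ v : Int, pvDiag (2, 1, v) = false from fun _ => rfl,
      show ∀ v : Int, pvDiag (2, 2, v) = false from fun _ => rfl,
      Bool.false_eq_true, if_neg, not_false_iff, if_pos, ite_self, List.append_nil]
    split_ifs <;> rfl
  rw [show ∀ G, appliquer_pattern_inversion G =
        ((List.range 3).foldl (fun acc i =>
          (List.range 3).foldl (fun acc j =>
            let v := pvCell G (Int.ofNat i) (Int.ofNat j)
            if v ≠ 0 then acc ++ [(i, j, v)] else acc) acc) []).foldl pvScatterStep
          (List.replicate 9 (List.replicate 9 (0 : Int)))
      from fun _ => rfl,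
    foldl_scatter_filter, hpos, hB]
  have hsA : ∀ v : Int, pvScatterStep (List.replicate 9 (List.replicate 9 (0 : Int))) (0, 2, v) =
      [[0, 0, 0, 0, 0, 0, v, v, v],
       [0, 0, 0, 0, 0, 0, v, v, v],
       [0, 0, 0, 0, 0, 0, v, v, v],
       [0, 0, 0, 0, 0, 0, 0, 0, 0],
       [0, 0, 0, 0, 0, 0, 0, 0, 0],
       [0, 0, 0, 0, 0, 0, 0, 0, 0],
       [0, 0, 0, 0, 0, 0, 0, 0, 0],
       [0, 0, 0, 0, 0, 0, 0, 0, 0],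
       [0, 0, 0, 0, 0, 0, 0, 0, 0]] := fun _ => rfl
  have hsB : ∀ v : Int, pvScatterStep (List.replicate 9 (List.replicate 9 (0 : Int))) (1, 1, v) =
      [[0, 0, 0, 0, 0, 0, 0, 0, 0],
       [0, 0, 0, 0, 0, 0, 0, 0, 0],
       [0, 0, 0, 0, 0, 0, 0, 0, 0],
       [0, 0, 0, v, v, v, 0, 0, 0],
       [0, 0, 0, v, v, v, 0, 0, 0],
       [0, 0, 0, v, v, v, 0, 0, 0],
       [0, 0, 0, 0, 0, 0, 0, 0, 0],
       [0, 0, 0, 0, 0, 0, 0, 0, 0],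
       [0, 0, 0, 0, 0, 0, 0, 0, 0]] := fun _ => rfl
  have hsC : ∀ v : Int, pvScatterStep (List.replicate 9 (List.replicate 9 (0 : Int))) (2, 0, v) =
      [[0, 0, 0, 0, 0, 0, 0, 0, 0],
       [0, 0, 0, 0, 0, 0, 0, 0, 0],
       [0, 0, 0, 0, 0, 0, 0, 0, 0],
       [0, 0, 0, 0, 0, 0, 0, 0, 0],
       [0, 0, 0, 0, 0, 0, 0, 0, 0],
       [0, 0, 0, 0, 0, 0, 0, 0, 0],
       [v, v, v, 0, 0, 0, 0, 0, 0],
       [v, v, v, 0, 0, 0, 0, 0, 0],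
       [v, v, v, 0, 0, 0, 0, 0, 0]] := fun _ => rfl
  have hsAB : ∀ u v : Int, pvScatterStep ([[0, 0, 0, 0, 0, 0, u, u, u],
       [0, 0, 0, 0, 0, 0, u, u, u],
       [0, 0, 0, 0, 0, 0, u, u, u],
       [0, 0, 0, 0, 0, 0, 0, 0, 0],
       [0, 0, 0, 0, 0, 0, 0, 0, 0],
       [0, 0, 0, 0, 0, 0, 0, 0, 0],
       [0, 0, 0, 0, 0, 0, 0, 0, 0],
       [0, 0, 0, 0, 0, 0, 0, 0, 0],
       [0, 0, 0, 0, 0, 0, 0, 0, 0]]) (1, 1, v) =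
      [[0, 0, 0, 0, 0, 0, u, u, u],
       [0, 0, 0, 0, 0, 0, u, u, u],
       [0, 0, 0, 0, 0, 0, u, u, u],
       [0, 0, 0, v, v, v, 0, 0, 0],
       [0, 0, 0, v, v, v, 0, 0, 0],
       [0, 0, 0, v, v, v, 0, 0, 0],
       [0, 0, 0, 0, 0, 0, 0, 0, 0],
       [0, 0, 0, 0, 0, 0, 0, 0, 0],
       [0, 0, 0, 0, 0, 0, 0, 0, 0]] := fun _ _ => rfl
  have hsAC : ∀ u v : Int, pvScatterStep ([[0, 0, 0, 0, 0, 0, u, u, u],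
       [0, 0, 0, 0, 0, 0, u, u, u],
       [0, 0, 0, 0, 0, 0, u, u, u],
       [0, 0, 0, 0, 0, 0, 0, 0, 0],
       [0, 0, 0, 0, 0, 0, 0, 0, 0],
       [0, 0, 0, 0, 0, 0, 0, 0, 0],
       [0, 0, 0, 0, 0, 0, 0, 0, 0],
       [0, 0, 0, 0, 0, 0, 0, 0, 0],
       [0, 0, 0, 0, 0, 0, 0, 0, 0]]) (2, 0, v) =
      [[0, 0, 0, 0, 0, 0, u, u, u],
       [0, 0, 0, 0, 0, 0, u, u, u],
       [0, 0, 0, 0, 0, 0, u, u, u],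
       [0, 0, 0, 0, 0, 0, 0, 0, 0],
       [0, 0, 0, 0, 0, 0, 0, 0, 0],
       [0, 0, 0, 0, 0, 0, 0, 0, 0],
       [v, v, v, 0, 0, 0, 0, 0, 0],
       [v, v, v, 0, 0, 0, 0, 0, 0],
       [v, v, v, 0, 0, 0, 0, 0, 0]] := fun _ _ => rfl
  have hsBC : ∀ u v : Int, pvScatterStep ([[0, 0, 0, 0, 0, 0, 0, 0, 0],
       [0, 0, 0, 0, 0, 0, 0, 0, 0],
       [0, 0, 0, 0, 0, 0, 0, 0, 0],
       [0, 0, 0, u, u, u, 0, 0, 0],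
       [0, 0, 0, u, u, u, 0, 0, 0],
       [0, 0, 0, u, u, u, 0, 0, 0],
       [0, 0, 0, 0, 0, 0, 0, 0, 0],
       [0, 0, 0, 0, 0, 0, 0, 0, 0],
       [0, 0, 0, 0, 0, 0, 0, 0, 0]]) (2, 0, v) =
      [[0, 0, 0, 0, 0, 0, 0, 0, 0],
       [0, 0, 0, 0, 0, 0, 0, 0, 0],
       [0, 0, 0, 0, 0, 0, 0, 0, 0],
       [0, 0, 0, u, u, u, 0, 0, 0],
       [0, 0, 0, u, u, u, 0, 0, 0],
       [0, 0, 0, u, u, u, 0, 0, 0],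
       [v, v, v, 0, 0, 0, 0, 0, 0],
       [v, v, v, 0, 0, 0, 0, 0, 0],
       [v, v, v, 0, 0, 0, 0, 0, 0]] := fun _ _ => rfl
  have hsABC : ∀ u v w : Int, pvScatterStep ([[0, 0, 0, 0, 0, 0, u, u, u],
       [0, 0, 0, 0, 0, 0, u, u, u],
       [0, 0, 0, 0, 0, 0, u, u, u],
       [0, 0, 0, v, v, v, 0, 0, 0],
       [0, 0, 0, v, v, v, 0, 0, 0],
       [0, 0, 0, v, v, v, 0, 0, 0],
       [0, 0, 0, 0, 0, 0, 0, 0, 0],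
       [0, 0, 0, 0, 0, 0, 0, 0, 0],
       [0, 0, 0, 0, 0, 0, 0, 0, 0]]) (2, 0, w) =
      [[0, 0, 0, 0, 0, 0, u, u, u],
       [0, 0, 0, 0, 0, 0, u, u, u],
       [0, 0, 0, 0, 0, 0, u, u, u],
       [0, 0, 0, v, v, v, 0, 0, 0],
       [0, 0, 0, v, v, v, 0, 0, 0],
       [0, 0, 0, v, v, v, 0, 0, 0],
       [w, w, w, 0, 0, 0, 0, 0, 0],
       [w, w, w, 0, 0, 0, 0, 0, 0],
       [w, w, w, 0, 0, 0, 0, 0, 0]] := fun _ _ _ => rfl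
  split_ifs <;>
    (try simp only [ne_eq, not_not] at *) <;> subst_vars <;>
    simp only [List.nil_append, List.append_nil, List.cons_append,
      List.foldl_cons, List.foldl_nil, hsA, hsB, hsC, hsAB, hsAC, hsBC, hsABC] <;>
    rfl
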